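-- pv_equiv track=rewrite | github.com/moreenhettihewa/distributed_kv_store | kv_store/replication.py | get_replicas
-- ===== SOURCE A (Python) =====
-- def get_replicas(key_hash, ring, replication_factor):
--     ring_hashes = [hash for hash, _ in ring]
--     # Find nodes which are clockwise directed
--     for i, h in enumerate(ring_hashes):
--         if key_hash <= h:
--             start = i
--             break
--     else:
--         start = 0
--
--     result = []
--     seen_nodes = set()
--     i = start
--     while len(result) < replication_factor:
--         _, node_id = ring[i%len(ring)]
--         if node_id not in seen_nodes:
--             result.append(node_id)
--             seen_nodes.add(node_id)
--         i+=1
--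
--     return result
-- ===== SOURCE B (Python) =====
-- def get_replicas(key_hash, ring, replication_factor):
--     if replication_factor <= 0:
--         return []
--     start = next((i for i, (h, _) in enumerate(ring) if key_hash <= h), 0)
--     rotated = ring[start:] + ring[:start]
--     distinct = list(dict.fromkeys(node for _, node in rotated))
--     return distinct[:replication_factor]
-- ===== Notes on version B (the rewrite author's own statement) =====
-- stated objective: simpler
-- what changed: Replaces the unbounded while-loop cycling with modulo indexing and a seen-set by one bounded pass: rotate the ring at the start index with two slices, dedup node ids in first-occurrence order via dict.fromkeys, and truncate to replication_factor.
import Mathlib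
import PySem

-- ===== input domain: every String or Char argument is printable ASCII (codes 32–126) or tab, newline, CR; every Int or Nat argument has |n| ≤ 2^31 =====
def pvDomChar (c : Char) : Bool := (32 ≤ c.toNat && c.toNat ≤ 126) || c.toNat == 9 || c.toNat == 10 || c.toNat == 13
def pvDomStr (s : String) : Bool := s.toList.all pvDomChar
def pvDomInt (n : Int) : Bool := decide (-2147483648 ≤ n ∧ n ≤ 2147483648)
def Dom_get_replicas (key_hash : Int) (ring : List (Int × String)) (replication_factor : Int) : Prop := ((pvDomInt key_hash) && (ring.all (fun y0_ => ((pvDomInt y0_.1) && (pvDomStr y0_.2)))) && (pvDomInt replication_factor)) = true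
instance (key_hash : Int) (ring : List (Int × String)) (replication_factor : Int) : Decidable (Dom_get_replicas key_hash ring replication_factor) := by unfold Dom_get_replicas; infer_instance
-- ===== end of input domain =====

-- B replaces A's unbounded modulo-cycling while-loop + seen-set with one bounded pass:
-- rotate the ring at the start index (two slices), ordered dedup, truncate (objective: simpler).


-- ===== PORT A =====
-- the for/else scan over enumerate(ring_hashes): first index with key_hash ≤ h, else 0
def pvScanStart (key_hash : Int) : List Int → Nat → Nat
  | [], _ => 0
  | h :: t, i => if key_hash ≤ h then i else pvScanStart key_hash t (i + 1)

-- the 'while len(result) < replication_factor' loop.  Fuel = len(ring) is a totality guard only: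
-- under Pre_ the Python loop performs at most len(ring) iterations, exactly these.
-- 'i % len(ring)' with an empty ring is Python's ZeroDivisionError: pyGet? returns none there
-- (index out of range), the none branch is unreachable under Pre_.
def pvLoopA (ring : List (Int × String)) (replication_factor : Int) :
    Nat → Nat → List String → PySem.Set String → List String
  | 0, _, result, _ => result
  | fuel + 1, i, result, seen =>
    if (result.length : Int) < replication_factor then
      match PySem.List.pyGet? ring ((i % ring.length : Nat) : Int) with
      | none => result
      | some (_, node_id) =>
        if PySem.Set.contains seen node_id then
          pvLoopA ring replication_factor fuel (i + 1) result seen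
        else
          pvLoopA ring replication_factor fuel (i + 1) (result ++ [node_id]) (PySem.Set.add seen node_id)
    else result

def get_replicas (key_hash : Int) (ring : List (Int × String)) (replication_factor : Int) : List String :=
  let ring_hashes := ring.map Prod.fst
  let start := pvScanStart key_hash ring_hashes 0
  pvLoopA ring replication_factor ring.length start [] PySem.Set.empty

-- ===== PORT B =====
-- next((i for i, (h, _) in enumerate(ring) if key_hash <= h), 0)
def altScanStart (key_hash : Int) : List (Int × String) → Nat → Nat
  | [], _ => 0
  | (h, _) :: t, i => if key_hash ≤ h then i else altScanStart key_hash t (i + 1)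

def get_replicas_alt (key_hash : Int) (ring : List (Int × String)) (replication_factor : Int) : List String :=
  if replication_factor ≤ 0 then []
  else
    let start := altScanStart key_hash ring 0
    let rotated := PySem.List.slice ring (some (start : Int)) none ++ PySem.List.slice ring none (some (start : Int))
    let distinct := PySem.List.dedup (rotated.map Prod.snd)
    PySem.List.slice distinct none (some replication_factor)

-- ===== PRECONDITION & SPEC =====
-- Pre_ excludes exactly the inputs on which Python A does not return: an empty ring with
-- replication_factor > 0 (ZeroDivisionError at i % len(ring)) and replication_factor greater
-- than the number of distinct node ids (the while loop never terminates).
def Pre_get_replicas (key_hash : Int) (ring : List (Int × String)) (replication_factor : Int) : Prop :=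
  replication_factor ≤ 0 ∨
    (ring ≠ [] ∧ replication_factor ≤ (PySem.List.dedup (ring.map Prod.snd)).length)
instance (key_hash : Int) (ring : List (Int × String)) (replication_factor : Int) : Decidable (Pre_get_replicas key_hash ring replication_factor) := by unfold Pre_get_replicas; infer_instance

def pvWitness_get_replicas : Int × (List (Int × String)) × Int := (5, [(3, "a"), (7, "b")], 2)

def Spec_get_replicas (key_hash : Int) (ring : List (Int × String)) (replication_factor : Int) (out : List String) : Prop := out = get_replicas_alt key_hash ring replication_factor
instance (key_hash : Int) (ring : List (Int × String)) (replication_factor : Int) (out : List String) : Decidable (Spec_get_replicas key_hash ring replication_factor out) := by unfold Spec_get_replicas; infer_instance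

-- ===== CLAIM (what is proved, stated in full; the proofs are below) =====
def Claim_equal_get_replicas : Prop := ∀ (key_hash : Int) (ring : List (Int × String)) (replication_factor : Int), Dom_get_replicas key_hash ring replication_factor → Pre_get_replicas key_hash ring replication_factor → Spec_get_replicas key_hash ring replication_factor (get_replicas key_hash ring replication_factor)


-- ===== LEMMAS AND PROOFS =====

-- list form of A's while loop: consume a stream of node ids
def pvCollect (rf : Int) : List String → PySem.Set String → List String → List String
  | result, _, [] => result
  | result, seen, x :: xs =>
    if (result.length : Int) < rf then
      if PySem.Set.contains seen x then pvCollect rf result seen xs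
      else pvCollect rf (result ++ [x]) (PySem.Set.add seen x) xs
    else result

-- ordered dedup of the elements not yet in seen
def pvDed (seen : PySem.Set String) : List String → List String
  | [] => []
  | x :: xs => if PySem.Set.contains seen x then pvDed seen xs
               else x :: pvDed (PySem.Set.add seen x) xs

theorem pvScanStart_eq (key_hash : Int) (l : List (Int × String)) (i : Nat) :
    pvScanStart key_hash (l.map Prod.fst) i = altScanStart key_hash l i := by
  induction l generalizing i with
  | nil => rfl
  | cons p t ih => simp [pvScanStart, altScanStart, ih]

theorem altScanStart_bound (key_hash : Int) (l : List (Int × String)) (i : Nat) :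
    altScanStart key_hash l i < i + l.length ∨ altScanStart key_hash l i = 0 := by
  induction l generalizing i with
  | nil => right; rfl
  | cons p t ih =>
    cases p with
    | mk h s =>
      by_cases hle : key_hash ≤ h
      · left
        simp only [altScanStart, if_pos hle, List.length_cons]
        omega
      · rcases ih (i + 1) with hb | hb
        · left
          simp only [altScanStart, if_neg hle, List.length_cons]
          omega
        · right; simpa [altScanStart, hle] using hb

-- A's loop consumes the stream ring[(i+k) % n].2 for k < fuel
theorem pvLoopA_eq_pvCollect (ring : List (Int × String)) (rf : Int) (hn : 0 < ring.length) :
    ∀ (fuel i : Nat) (result : List String) (seen : PySem.Set String),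
      pvLoopA ring rf fuel i result seen =
        pvCollect rf result seen
          ((List.range fuel).map (fun k => (ring.getD ((i + k) % ring.length) (0, "")).2)) := by
  intro fuel
  induction fuel with
  | zero => intro i result seen; rfl
  | succ fuel ih =>
    intro i result seen
    have hlt : i % ring.length < ring.length := Nat.mod_lt _ hn
    have hget : PySem.List.pyGet? ring ((i % ring.length : Nat) : Int)
        = some (ring.getD (i % ring.length) (0, "")) := by
      rw [PySem.List.pyGet?_natCast]
      simp [List.getD, List.getElem?_eq_getElem hlt]
    rw [List.range_succ_eq_map, List.map_cons, List.map_map]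
    have hmaps : ((List.range fuel).map ((fun k => (ring.getD ((i + k) % ring.length) (0, "")).2) ∘ Nat.succ))
        = (List.range fuel).map (fun k => (ring.getD ((i + 1 + k) % ring.length) (0, "")).2) := by
      apply List.map_congr_left
      intro k _
      simp [Function.comp]
      ring_nf
    rw [hmaps]
    simp only [pvLoopA, hget, pvCollect, Nat.add_zero, ih]

theorem pvCollect_eq_take (rf : Int) :
    ∀ (l : List String) (result : List String) (seen : PySem.Set String),
      result.length ≤ rf.toNat →
      pvCollect rf result seen l = (result ++ pvDed seen l).take rf.toNat := by
  intro l
  induction l with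
  | nil =>
    intro result seen hlen
    simp [pvCollect, pvDed, List.take_of_length_le hlen]
  | cons x xs ih =>
    intro result seen hlen
    by_cases hc : (result.length : Int) < rf
    · by_cases hm : x ∈ seen
      · have hs : PySem.Set.contains seen x = true := (PySem.Set.contains_iff seen x).mpr hm
        simp only [pvCollect, pvDed, if_pos hc, hs, if_true]
        exact ih result seen hlen
      · have hs : PySem.Set.contains seen x = false := by
          simpa using fun h => hm ((PySem.Set.contains_iff seen x).mp h)
        simp only [pvCollect, pvDed, if_pos hc, hs, Bool.false_eq_true, if_false]
        rw [ih (result ++ [x]) (PySem.Set.add seen x) (by simp; omega)]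
        simp
    · have hlen' : result.length = rf.toNat := by omega
      simp only [pvCollect, if_neg hc]
      rw [List.take_append_of_le_length (by omega), List.take_of_length_le (by omega)]

theorem update_eq_append_pvDed (l : List String) :
    ∀ (s : PySem.Set String), PySem.Set.update s l = s ++ pvDed s l := by
  induction l with
  | nil => intro s; simp [PySem.Set.update_nil, pvDed]
  | cons x xs ih =>
    intro s
    rw [PySem.Set.update_cons]
    by_cases hm : x ∈ s
    · have hs : PySem.Set.contains s x = true := (PySem.Set.contains_iff s x).mpr hm
      rw [PySem.Set.add_of_mem hm, ih s]
      simp [pvDed, hm]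
    · have hs : PySem.Set.contains s x = false := by
        simpa using fun h => hm ((PySem.Set.contains_iff s x).mp h)
      have hded : pvDed s (x :: xs) = x :: pvDed (PySem.Set.add s x) xs := by
        simp [pvDed, hm]
      rw [hded, ih (PySem.Set.add s x), PySem.Set.add_of_not_mem hm]
      simp

theorem dedup_eq_pvDed (l : List String) :
    PySem.List.dedup l = pvDed PySem.Set.empty l := by
  have h := update_eq_append_pvDed l PySem.Set.empty
  rw [PySem.Set.update_empty] at h
  simpa [PySem.List.dedup_eq_ofList] using h

-- the rotated stream: for start < n, ring[(start+k) % n] over k < n is drop start ++ take start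
theorem stream_eq_rotated (ring : List (Int × String)) (start : Nat)
    (hs : start < ring.length) :
    (List.range ring.length).map (fun k => (ring.getD ((start + k) % ring.length) (0, "")).2)
      = (ring.drop start ++ ring.take start).map Prod.snd := by
  have hn : 0 < ring.length := Nat.lt_of_le_of_lt (Nat.zero_le _) hs
  apply List.ext_getElem
  · simp; omega
  · intro k h1 h2
    simp only [List.getElem_map, List.getElem_range]
    have hk : k < ring.length := by simpa using h1
    by_cases hcase : start + k < ring.length
    · have hmod : (start + k) % ring.length = start + k := Nat.mod_eq_of_lt hcase
      rw [hmod]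
      rw [List.getElem_append_left (by simp; omega)]
      simp [List.getElem_drop, List.getD, List.getElem?_eq_getElem hcase]
    · have hmod : (start + k) % ring.length = start + k - ring.length := by
        have h2n : start + k < 2 * ring.length := by omega
        rw [Nat.mod_eq_sub_mod (by omega), Nat.mod_eq_of_lt (by omega)]
      rw [hmod]
      rw [List.getElem_append_right (by simp; omega)]
      have hidx : start + k - ring.length < ring.length := by omega
      have hidx2 : k - (ring.length - start) = start + k - ring.length := by omega
      simp [List.getElem_take, hidx2, List.getD, List.getElem?_eq_getElem hidx]

-- ===== VERDICT (by name: the statement is the Claim_ definition above) =====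
theorem get_replicas_spec : Claim_equal_get_replicas := by
  intro key_hash ring rf _hdom hpre
  unfold Spec_get_replicas get_replicas get_replicas_alt
  by_cases hrf : rf ≤ 0
  · -- the while loop body never runs; B returns [] directly
    simp only [if_pos hrf]
    cases hfuel : ring.length with
    | zero => rfl
    | succ m =>
      simp only [pvLoopA]
      rw [if_neg (by simp; omega)]
  · have hrfpos : 0 < rf := by omega
    rcases hpre with h | ⟨hne, _hcnt⟩
    · omega
    have hn : 0 < ring.length := List.length_pos_of_ne_nil hne
    simp only [if_neg hrf]
    set start := altScanStart key_hash ring 0 with hstartdef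
    have hstart : start < ring.length := by
      rcases altScanStart_bound key_hash ring 0 with hb | hb
      · omega
      · omega
    rw [pvScanStart_eq, ← hstartdef]
    rw [pvLoopA_eq_pvCollect ring rf hn ring.length start [] PySem.Set.empty]
    rw [stream_eq_rotated ring start hstart]
    rw [pvCollect_eq_take rf _ [] PySem.Set.empty (by simp)]
    rw [PySem.List.slice_from_natCast, PySem.List.slice_to_natCast,
        PySem.List.slice_to _ (by omega : (0:Int) ≤ rf)]
    rw [dedup_eq_pvDed]
    simp
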